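-- pv_equiv track=rewrite | github.com/NicolasFacciano/TP1_Sintaxis | AFDs.py | automata_espacio
-- ===== SOURCE A (Python) =====
-- ESTADO_FINAL = "ESTADO FINAL"
--
-- ESTADO_NO_FINAL = "NO ACEPTADO"
--
-- ESTADO_TRAMPA = "EN ESTADO TRAMPA"
--
-- def automata_espacio(lexema):
--     estados_finales = [1]
--     estado = 0
--     for c in lexema:
--         if estado == 0 and c in [' ', '\t', '\n']:
--             estado = 1
--         elif estado == 1 and c in [' ', '\t', '\n']:
--             estado = 1
--         else:
--             estado = -1
--             break
--     if estado == -1: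
--         return ESTADO_TRAMPA
--     if estado in estados_finales:
--         return ESTADO_FINAL
--     return ESTADO_NO_FINAL
-- ===== SOURCE B (Python) =====
-- ESTADO_FINAL = "ESTADO FINAL"
-- ESTADO_NO_FINAL = "NO ACEPTADO"
-- ESTADO_TRAMPA = "EN ESTADO TRAMPA"
--
-- def automata_espacio(lexema):
--     if lexema == "":
--         return ESTADO_NO_FINAL
--     return ESTADO_FINAL if lexema.strip(' \t\n') == '' else ESTADO_TRAMPA
-- ===== Notes on version B (the rewrite author's own statement) =====
-- stated objective: simpler
-- what changed: Replaces the per-character DFA state loop with an empty-string check followed by a single whole-string strip test over the three accepted whitespace characters (space, tab, newline).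
import Mathlib
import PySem

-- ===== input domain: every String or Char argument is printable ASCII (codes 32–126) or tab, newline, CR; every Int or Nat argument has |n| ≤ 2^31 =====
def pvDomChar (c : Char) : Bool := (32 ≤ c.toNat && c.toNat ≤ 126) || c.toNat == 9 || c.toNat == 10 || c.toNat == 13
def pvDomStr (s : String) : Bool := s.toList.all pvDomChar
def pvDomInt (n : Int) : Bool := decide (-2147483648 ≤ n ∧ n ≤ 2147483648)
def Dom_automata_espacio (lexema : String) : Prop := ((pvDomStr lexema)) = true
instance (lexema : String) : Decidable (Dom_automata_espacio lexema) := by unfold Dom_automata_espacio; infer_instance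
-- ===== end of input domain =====

-- B replaces A's per-character DFA state loop by an empty-string check plus a single
-- whole-string test lexema.strip(' \t\n') == '' (objective: simpler).

-- ===== PORT A =====
-- the for-loop with its `break` (break sets estado = -1 and stops)
def aLoopA : List Char → Int → Int
  | [], estado => estado
  | c :: rest, estado =>
    if estado == 0 && [' ', '\t', '\n'].contains c then aLoopA rest 1
    else if estado == 1 && [' ', '\t', '\n'].contains c then aLoopA rest 1
    else (-1)

def automata_espacio (lexema : String) : String :=
  let estados_finales : List Int := [1]
  let estado := aLoopA lexema.toList 0
  if estado == -1 then "EN ESTADO TRAMPA"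
  else if estados_finales.contains estado then "ESTADO FINAL"
  else "NO ACEPTADO"

-- ===== PORT B =====
def automata_espacio_alt (lexema : String) : String :=
  if lexema == "" then "NO ACEPTADO"
  else if PySem.Str.stripChars lexema " \t\n" == "" then "ESTADO FINAL"
  else "EN ESTADO TRAMPA"

-- ===== PRECONDITION & SPEC =====
def Spec_automata_espacio (lexema : String) (out : String) : Prop := out = automata_espacio_alt lexema
instance (lexema : String) (out : String) : Decidable (Spec_automata_espacio lexema out) := by unfold Spec_automata_espacio; infer_instance

-- ===== CLAIM (what is proved, stated in full; the proofs are below) =====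
def Claim_equal_automata_espacio : Prop := ∀ (lexema : String), Dom_automata_espacio lexema → Spec_automata_espacio lexema (automata_espacio lexema)

-- ===== LEMMAS AND PROOFS =====
theorem aLoopA_one (cs : List Char) :
    aLoopA cs 1 = if cs.all (fun c => [' ', '\t', '\n'].contains c) then 1 else -1 := by
  induction cs with
  | nil => simp [aLoopA]
  | cons c rest ih =>
    by_cases h : [' ', '\t', '\n'].contains c <;>
      simp [aLoopA, ih] <;> split_ifs <;> tauto

theorem dropWhile_all (p : Char → Bool) (s : List Char) :
    (∀ x ∈ List.dropWhile p s, p x = true) ↔ ∀ x ∈ s, p x = true := by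
  induction s with
  | nil => simp
  | cons c t ih => by_cases h : p c <;> simp [h, ih]

theorem stripChars_eq_nil (p : Char → Bool) (s : List Char) :
    ((List.dropWhile p (List.dropWhile p s).reverse).reverse = [] ↔ ∀ x ∈ s, p x = true) := by
  rw [List.reverse_eq_nil_iff, List.dropWhile_eq_nil_iff]
  simpa using dropWhile_all p s

theorem toList_eq_nil_iff (s : String) : s.toList = [] ↔ s = "" := by
  constructor
  · intro h
    simpa using congrArg String.ofList h
  · intro h; simp [h]

theorem aLoopA_zero (c : Char) (rest : List Char) :
    aLoopA (c :: rest) 0 =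
      if (c :: rest).all (fun x => [' ', '\t', '\n'].contains x) then 1 else -1 := by
  by_cases h : [' ', '\t', '\n'].contains c <;>
    simp [aLoopA, aLoopA_one, h] <;> split_ifs <;> tauto

theorem automata_espacio_spec : Claim_equal_automata_espacio := by
  intro lexema _
  unfold Spec_automata_espacio automata_espacio automata_espacio_alt
  rcases hl : lexema.toList with _ | ⟨c, rest⟩
  · have he : lexema = "" := (toList_eq_nil_iff lexema).1 hl
    simp [he, aLoopA]
  · have hne : ¬ lexema = "" := by
      intro he; rw [he] at hl; simp at hl
    have hts : (" \t\n" : String).toList = [' ', '\t', '\n'] := by decide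
    have hstrip : (PySem.Str.stripChars lexema " \t\n" = "") ↔
        ∀ x ∈ lexema.toList, ([' ', '\t', '\n'].contains x) = true := by
      rw [← toList_eq_nil_iff]
      rw [PySem.Str.toList_stripChars, hts]
      unfold PySem.Chars.stripChars
      exact stripChars_eq_nil _ _
    rw [hl] at hstrip
    have hb1 : (lexema == "") = false := by simp [hne]
    by_cases hall : (c :: rest).all (fun x => [' ', '\t', '\n'].contains x)
    · have hs : PySem.Str.stripChars lexema " \t\n" = "" :=
        hstrip.2 (fun x hx => List.all_eq_true.1 hall x hx)
      have hb2 : (PySem.Str.stripChars lexema " \t\n" == "") = true := by simp [hs]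
      have hb3 : aLoopA (c :: rest) 0 = 1 := by rw [aLoopA_zero, if_pos hall]
      simp [hb1, hb2, hb3]
    · have hs : ¬ PySem.Str.stripChars lexema " \t\n" = "" := by
        intro h
        exact hall (List.all_eq_true.2 (hstrip.1 h))
      have hb2 : (PySem.Str.stripChars lexema " \t\n" == "") = false := by simp [hs]
      have hb3 : aLoopA (c :: rest) 0 = -1 := by rw [aLoopA_zero, if_neg hall]
      simp [hb1, hb2, hb3]
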